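-- pv_equiv track=rewrite | github.com/ilyaodnor/Huiswerk | periode 3/week26/boodschappen.py | text_tussenhakjes
-- ===== SOURCE A (Python) =====
-- def text_tussenhakjes (text):
--     lijst = ''
--     inside_breckets = False
--
--     for i in text:
--         if i == '[':
--             inside_breckets = True
--             continue
--         elif i == ']':
--             inside_breckets = False
--             continue
--
--         if inside_breckets:
--             lijst+= i
--     return lijst
-- ===== SOURCE B (Python) =====
-- def text_tussenhakjes(text):
--     # join, for each chunk following a '[', its prefix before the first ']'
--     return ''.join(chunk.split(']', 1)[0] for chunk in text.split('[')[1:])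
-- ===== Notes on version B (the rewrite author's own statement) =====
-- stated objective: idiomatic
-- what changed: Replaced the manual inside_breckets flag loop over characters with a split-based one-liner: join, for each chunk of text.split('[') after the first, its prefix before the first ']'.
import Mathlib
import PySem

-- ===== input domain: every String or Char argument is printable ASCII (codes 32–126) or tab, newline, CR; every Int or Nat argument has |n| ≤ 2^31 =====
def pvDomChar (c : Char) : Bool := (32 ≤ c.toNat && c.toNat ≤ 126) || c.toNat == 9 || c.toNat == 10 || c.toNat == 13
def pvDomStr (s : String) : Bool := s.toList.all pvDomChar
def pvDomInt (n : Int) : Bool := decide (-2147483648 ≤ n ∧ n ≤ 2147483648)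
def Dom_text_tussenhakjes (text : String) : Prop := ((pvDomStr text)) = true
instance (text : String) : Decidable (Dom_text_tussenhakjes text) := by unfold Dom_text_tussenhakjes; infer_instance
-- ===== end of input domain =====

-- B replaces A's flag-driven character loop with a split-based join (idiomatic; same cost, no flag state).

-- ===== PORT A =====
-- character loop with the string accumulator `lijst` and the flag `inside_breckets`
def text_tussenhakjes (text : String) : String :=
  let r := text.toList.foldl
    (fun (st : List Char × Bool) i =>
      if i = '[' then (st.1, true)
      else if i = ']' then (st.1, false)
      else if st.2 then (st.1 ++ [i], st.2) else st)
    ([], false)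
  String.mk r.1

-- ===== PORT B =====
-- ''.join(chunk.split(']', 1)[0] for chunk in text.split('[')[1:]); the [0] of a split
-- result is its head (split never returns an empty list, so headD's default is unreachable)
def text_tussenhakjes_alt (text : String) : String :=
  String.mk (PySem.Chars.join []
    (((PySem.Chars.splitOn text.toList ['[']).drop 1).map
      (fun chunk => (PySem.Chars.splitOnMax chunk [']'] 1).headD [])))

-- ===== PRECONDITION & SPEC =====
def Spec_text_tussenhakjes (text : String) (out : String) : Prop := out = text_tussenhakjes_alt text
instance (text : String) (out : String) : Decidable (Spec_text_tussenhakjes text out) := by unfold Spec_text_tussenhakjes; infer_instance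

-- ===== CLAIM (what is proved, stated in full; the proofs are below) =====
def Claim_equal_text_tussenhakjes : Prop := ∀ (text : String), Dom_text_tussenhakjes text → Spec_text_tussenhakjes text (text_tussenhakjes text)

-- ===== LEMMAS AND PROOFS =====

-- reference splitter: pieces of cs between consecutive '[' characters
def mySplit : List Char → List (List Char)
  | [] => [[]]
  | c :: r => if c = '[' then [] :: mySplit r else (mySplit r).modifyHead (c :: ·)

theorem mySplit_ne_nil (cs : List Char) : mySplit cs ≠ [] := by
  cases cs with
  | nil => simp [mySplit]
  | cons c r =>
    simp only [mySplit]
    split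
    · simp
    · cases h : mySplit r with
      | nil => exact absurd h (mySplit_ne_nil r)
      | cons p ps => simp [List.modifyHead]

theorem go_split (fuel : Nat) (l cur : List Char) (acc : List (List Char))
    (h : l.length < fuel) :
    PySem.Chars.splitOn.go ['['] fuel l cur acc
      = acc.reverse ++ (mySplit l).modifyHead (cur.reverse ++ ·) := by
  induction fuel generalizing l cur acc with
  | zero => omega
  | succ fuel ih =>
    cases l with
    | nil => rw [PySem.Chars.splitOn.go.eq_def]; simp [mySplit]
    | cons c rest =>
      rw [PySem.Chars.splitOn.go.eq_def]
      simp only []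
      by_cases hc : c = '['
      · have hp : [('[':Char)].isPrefixOf (c :: rest) = true := by simp [hc, List.isPrefixOf]
        simp only [hp, if_true, List.length_cons, List.drop_succ_cons, List.length_nil, List.drop_zero]
        rw [ih rest [] (cur.reverse :: acc) (by simpa using Nat.lt_of_succ_lt_succ h)]
        cases hms : mySplit rest with
        | nil => exact absurd hms (mySplit_ne_nil rest)
        | cons p ps => simp [mySplit, hc, hms]
      · have hp : [('[':Char)].isPrefixOf (c :: rest) = false := by simp [List.isPrefixOf]; exact fun h => hc h.symm
        simp only [hp, Bool.false_eq_true, if_false]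
        rw [ih rest (c :: cur) acc (by simpa using Nat.lt_of_succ_lt_succ h)]
        cases hms : mySplit rest with
        | nil => exact absurd hms (mySplit_ne_nil rest)
        | cons p ps =>
          rw [show mySplit (c::rest) = (mySplit rest).modifyHead (c :: ·) from by
            simp only [mySplit, hc, if_false]]
          simp [hms, List.modifyHead]

theorem splitOn_eq_mySplit (cs : List Char) :
    PySem.Chars.splitOn cs ['['] = mySplit cs := by
  unfold PySem.Chars.splitOn
  rw [go_split _ _ _ _ (Nat.lt_succ_self _)]
  cases hms : mySplit cs with
  | nil => exact absurd hms (mySplit_ne_nil cs)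
  | cons p ps => simp [List.modifyHead]

theorem goMax0_pair (fuel : Nat) (l cur a : List Char) :
    ∃ x, PySem.Chars.splitOnMax.go [']'] fuel 0 l cur [a] = [a, x] := by
  cases fuel with
  | zero => exact ⟨cur.reverse ++ l, by rw [PySem.Chars.splitOnMax.go.eq_def]; simp⟩
  | succ f =>
    cases l with
    | nil => exact ⟨cur.reverse, by rw [PySem.Chars.splitOnMax.go.eq_def]; simp⟩
    | cons c r =>
      exact ⟨cur.reverse ++ (c :: r), by rw [PySem.Chars.splitOnMax.go.eq_def]; simp⟩

theorem goMax1_head (fuel : Nat) (l cur : List Char) (h : l.length < fuel) :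
    (PySem.Chars.splitOnMax.go [']'] fuel 1 l cur []).headD []
      = cur.reverse ++ l.takeWhile (· ≠ ']') := by
  induction fuel generalizing l cur with
  | zero => omega
  | succ fuel ih =>
    cases l with
    | nil => rw [PySem.Chars.splitOnMax.go.eq_def]; simp
    | cons c rest =>
      rw [PySem.Chars.splitOnMax.go.eq_def]
      by_cases hc : c = ']'
      · have hp : [(']':Char)].isPrefixOf (c :: rest) = true := by simp [hc, List.isPrefixOf]
        simp only [hp, if_true, List.length_cons, List.drop_succ_cons, List.length_nil,
          List.drop_zero, Nat.one_ne_zero, if_false]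
        obtain ⟨x, hx⟩ := goMax0_pair fuel rest [] cur.reverse
        simp [hx, List.takeWhile, hc]
      · have hp : [(']':Char)].isPrefixOf (c :: rest) = false := by
          simp [List.isPrefixOf]; exact fun h => hc h.symm
        simp only [hp, Bool.false_eq_true, if_false, Nat.one_ne_zero]
        rw [ih rest (c :: cur) (by simpa using Nat.lt_of_succ_lt_succ h)]
        simp [List.takeWhile, hc]

theorem splitOnMax_head (cs : List Char) :
    (PySem.Chars.splitOnMax cs [']'] 1).headD [] = cs.takeWhile (· ≠ ']') := by
  unfold PySem.Chars.splitOnMax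
  rw [if_neg (by norm_num)]
  rw [show ((1:Int).toNat) = 1 from rfl]
  rw [goMax1_head _ _ _ (Nat.lt_succ_self _)]
  simp

def gSpec : Bool → List Char → List Char
  | _, [] => []
  | b, c :: r =>
    if c = '[' then gSpec true r
    else if c = ']' then gSpec false r
    else if b then c :: gSpec b r else gSpec b r

theorem gSpec_mySplit (cs : List Char) :
    gSpec false cs = (((mySplit cs).drop 1).map (List.takeWhile (· ≠ ']'))).flatten
      ∧ gSpec true cs = ((mySplit cs).map (List.takeWhile (· ≠ ']'))).flatten := by
  induction cs with
  | nil => simp [gSpec, mySplit]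
  | cons c r ih =>
    obtain ⟨ih1, ih2⟩ := ih
    cases hms : mySplit r with
    | nil => exact absurd hms (mySplit_ne_nil r)
    | cons p ps =>
      by_cases hc : c = '['
      · constructor
        · simp [gSpec, hc, mySplit, ih2]
        · simp [gSpec, hc, mySplit, ih2]
      · by_cases hd : c = ']'
        · constructor
          · simp [gSpec, hc, hd, mySplit, ih1, hms, List.modifyHead, List.takeWhile]
          · simp [gSpec, hc, hd, mySplit, ih1, hms, List.modifyHead, List.takeWhile]
        · constructor
          · simp [gSpec, hc, hd, mySplit, ih1, hms, List.modifyHead, List.takeWhile]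
          · simp [gSpec, hc, hd, mySplit, ih2, hms, List.modifyHead, List.takeWhile]

theorem join_nil_flatten (xs : List (List Char)) :
    PySem.Chars.join [] xs = xs.flatten := by
  unfold PySem.Chars.join List.intercalate
  induction xs with
  | nil => simp
  | cons x t ih =>
    cases t with
    | nil => simp
    | cons y r => simpa [List.intersperse] using ih

theorem foldl_gSpec (cs : List Char) (acc : List Char) (b : Bool) :
    (cs.foldl
      (fun (st : List Char × Bool) i =>
        if i = '[' then (st.1, true)
        else if i = ']' then (st.1, false)
        else if st.2 then (st.1 ++ [i], st.2) else st)
      (acc, b)).1 = acc ++ gSpec b cs := by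
  induction cs generalizing acc b with
  | nil => simp [gSpec]
  | cons c r ih =>
    simp only [List.foldl_cons, gSpec]
    by_cases h1 : c = '['
    · simp [h1, ih]
    · by_cases h2 : c = ']'
      · simp [h1, h2, ih]
      · cases b with
        | false => simp [h1, h2, ih]
        | true => simp [h1, h2, ih]

-- ===== VERDICT (by name: the statement is the Claim_ definition above) =====
theorem text_tussenhakjes_spec : Claim_equal_text_tussenhakjes := by
  intro text _
  show String.mk ((text.toList.foldl
      (fun (st : List Char × Bool) i =>
        if i = '[' then (st.1, true)
        else if i = ']' then (st.1, false)
        else if st.2 then (st.1 ++ [i], st.2) else st)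
      ([], false)).1) = text_tussenhakjes_alt text
  unfold text_tussenhakjes_alt
  rw [splitOn_eq_mySplit, join_nil_flatten, foldl_gSpec]
  congr 1
  rw [List.nil_append, (gSpec_mySplit text.toList).1]
  congr 1
  apply List.map_congr_left
  intro chunk _
  rw [splitOnMax_head]
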